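-- pv_equiv track=rewrite | github.com/b1ueskydragon/PythonGround | dailyOne/P305/rm_sum_zero.py | solve
-- ===== SOURCE A (Python) =====
-- def solve(lst):
--     # jump to next head.
--
--     start = 0
--     res = []
--     while start < len(lst):
--         curr = start
--         acc = 0
--         skip = False
--
--         while curr < len(lst):
--             acc += lst[curr]
--             if acc == 0:
--                 start = curr
--                 skip = True
--                 break
--
--             curr += 1
--
--         if not skip:
--             res.append(lst[start])  # printout
--
--         start += 1
--
--     return res
-- ===== SOURCE B (Python) =====
-- def solve(lst):
--     # O(n): prefix sums + dict of next index with equal prefix; greedy jumps in one pass.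
--     n = len(lst)
--     pref = [0]
--     for x in lst:
--         pref.append(pref[-1] + x)
--     nxt = [None] * (n + 1)
--     seen = {}
--     for i in range(n, -1, -1):
--         p = pref[i]
--         nxt[i] = seen.get(p)
--         seen[p] = i
--     res = []
--     start = 0
--     while start < n:
--         j = nxt[start]
--         if j is not None:
--             start = j
--         else:
--             res.append(lst[start])
--             start += 1
--     return res
-- ===== Notes on version B (the rewrite author's own statement) =====
-- stated objective: faster
-- what changed: Replaced A's rescan-from-every-head inner loop with precomputed prefix sums plus a dict mapping each prefix value to its next occurrence index, so the greedy zero-sum skips become O(1) jumps in a single pass.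
import Mathlib
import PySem

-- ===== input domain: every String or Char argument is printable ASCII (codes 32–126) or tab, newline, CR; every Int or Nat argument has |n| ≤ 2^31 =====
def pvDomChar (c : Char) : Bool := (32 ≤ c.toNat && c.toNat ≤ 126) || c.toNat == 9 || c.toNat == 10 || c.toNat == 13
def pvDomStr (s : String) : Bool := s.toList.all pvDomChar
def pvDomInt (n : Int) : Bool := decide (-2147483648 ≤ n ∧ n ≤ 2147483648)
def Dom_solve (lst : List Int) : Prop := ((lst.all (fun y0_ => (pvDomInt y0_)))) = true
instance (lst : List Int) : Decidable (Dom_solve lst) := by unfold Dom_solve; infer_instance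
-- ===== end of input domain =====

-- B replaces A's rescan-from-every-head inner loop with prefix sums and a dict of the
-- next equal-prefix index, doing the greedy zero-sum skips in one pass (objective: faster).
-- (In both ports the fuel parameter is only a totality guard for the Python while loops;
-- with the fuel the ports are called with it never runs out, since start strictly increases.)

-- ===== PORT A =====
-- inner while loop of A: scan from curr accumulating acc; some c = break with start=c (skip), none = no zero-sum
def innerA (lst : List Int) (fuel : Nat) (curr : Nat) (acc : Int) : Option Nat :=
  match fuel with
  | 0 => none
  | f + 1 =>
    if h : curr < lst.length then
      if acc + lst[curr] = 0 then some curr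
      else innerA lst f (curr + 1) (acc + lst[curr])
    else none

-- outer while loop of A
def outerA (lst : List Int) (fuel : Nat) (start : Nat) (res : List Int) : List Int :=
  match fuel with
  | 0 => res
  | f + 1 =>
    if h : start < lst.length then
      match innerA lst (lst.length - start) start 0 with
      | some c => outerA lst f (c + 1) res
      | none => outerA lst f (start + 1) (res ++ [lst[start]])
    else res

def solve (lst : List Int) : List Int := outerA lst lst.length 0 []

-- ===== PORT B =====
-- pref = [0]; for x in lst: pref.append(pref[-1] + x)   (p carries pref[-1])
def prefB : List Int → Int → List Int
  | [], p => [p]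
  | x :: xs, p => p :: prefB xs (p + x)

-- for i in range(len(pref)-1, -1, -1): nxt[i] = seen.get(pref[i]); seen[pref[i]] = i
-- (k counts down; acc collects nxt back-to-front, so nxt comes out in index order)
def buildNxt (pref : List Int) : Nat → PySem.Dict Int Nat → List (Option Nat) → List (Option Nat)
  | 0, _, acc => acc
  | k + 1, seen, acc =>
      buildNxt pref k (seen.insert (pref.getD k 0) k) (seen.get? (pref.getD k 0) :: acc)

-- while start < n: j = nxt[start]; jump to j if present else emit lst[start]
def loopB (lst : List Int) (nxt : List (Option Nat)) (fuel : Nat) (start : Nat) (res : List Int) : List Int :=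
  match fuel with
  | 0 => res
  | f + 1 =>
    if h : start < lst.length then
      match nxt.getD start none with
      | some j => loopB lst nxt f j res
      | none => loopB lst nxt f (start + 1) (res ++ [lst[start]])
    else res

def solve_alt (lst : List Int) : List Int :=
  let pref := prefB lst 0
  let nxt := buildNxt pref pref.length PySem.Dict.empty []
  loopB lst nxt lst.length 0 []

-- ===== PRECONDITION & SPEC =====
def Spec_solve (lst : List Int) (out : List Int) : Prop := out = solve_alt lst
instance (lst : List Int) (out : List Int) : Decidable (Spec_solve lst out) := by unfold Spec_solve; infer_instance

-- ===== CLAIM (what is proved, stated in full; the proofs are below) =====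
def Claim_equal_solve : Prop := ∀ (lst : List Int), Dom_solve lst → Spec_solve lst (solve lst)

-- ===== LEMMAS AND PROOFS =====

-- sum of the first i elements (the mathematical prefix sum both ports are related through)
def prefAt (lst : List Int) (i : Nat) : Int := (lst.take i).sum

-- first index j > i whose prefix sum equals pref[i]
def nextEq (pref : List Int) (i : Nat) : Option Nat :=
  (List.range' (i + 1) (pref.length - (i + 1))).find? (fun j => pref.getD j 0 == pref.getD i 0)

theorem prefB_length (lst : List Int) : ∀ p, (prefB lst p).length = lst.length + 1 := by
  induction lst with
  | nil => intro p; simp [prefB]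
  | cons x xs ih => intro p; simp [prefB, ih]

theorem prefAt_succ (lst : List Int) (i : Nat) (h : i < lst.length) :
    prefAt lst (i + 1) = prefAt lst i + lst.getD i 0 := by
  unfold prefAt
  rw [List.take_add_one, List.sum_append, List.getElem?_eq_getElem h]
  simp [List.getD, List.getElem?_eq_getElem h]

theorem prefB_getD (lst : List Int) : ∀ p i, i ≤ lst.length →
    (prefB lst p).getD i 0 = p + prefAt lst i := by
  induction lst with
  | nil =>
    intro p i hi
    have hz : i = 0 := by simpa using hi
    subst hz
    simp [prefB, prefAt]
  | cons x xs ih =>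
    intro p i hi
    cases i with
    | zero => simp [prefB, prefAt]
    | succ j =>
      simp only [prefB, List.getD_cons_succ]
      rw [ih (p + x) j (by simpa using hi)]
      unfold prefAt
      simp [List.take_succ_cons]
      ring

theorem find?_congr_mem {α : Type} (l : List α) (p q : α → Bool)
    (h : ∀ x ∈ l, p x = q x) : l.find? p = l.find? q := by
  induction l with
  | nil => rfl
  | cons a t ih =>
    simp only [List.find?_cons]
    rw [h a (by simp)]
    cases q a
    · exact ih (fun x hx => h x (by simp [hx]))
    · rfl

theorem range'_succ_left (n : Nat) : ∀ s, List.range' (s + 1) n = (List.range' s n).map (· + 1) := by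
  induction n with
  | zero => intro s; rfl
  | succ m ih =>
    intro s
    rw [List.range'_succ, List.range'_succ, ih (s + 1)]
    simp

-- seen invariant: after processing indices ≥ k, seen maps each value to the first index ≥ k holding it
def seenInv (pref : List Int) (k : Nat) (seen : PySem.Dict Int Nat) : Prop :=
  ∀ v, seen.get? v = (List.range' k (pref.length - k)).find? (fun j => pref.getD j 0 == v)

theorem buildNxt_eq (pref : List Int) : ∀ k seen acc, k ≤ pref.length → seenInv pref k seen →
    buildNxt pref k seen acc = (List.range k).map (nextEq pref) ++ acc := by
  intro k
  induction k with
  | zero => intro seen acc _ _; simp [buildNxt]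
  | succ k ih =>
    intro seen acc hk hinv
    have hkL : k < pref.length := by omega
    rw [buildNxt]
    have hstep : seenInv pref k (seen.insert (pref.getD k 0) k) := by
      intro v
      rw [PySem.Dict.get?_insert]
      have : pref.length - k = (pref.length - (k + 1)) + 1 := by omega
      rw [this, List.range'_succ, List.find?_cons]
      by_cases hv : v = pref.getD k 0
      · simp [hv]
      · have hb : (pref.getD k 0 == v) = false := by
          simp only [beq_eq_false_iff_ne]; exact fun hh => hv hh.symm
        simp only [hb, if_neg hv]
        exact hinv v
    rw [ih _ _ (by omega) hstep]
    have hget : seen.get? (pref.getD k 0) = nextEq pref k := hinv (pref.getD k 0)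
    rw [hget, List.range_succ]
    simp

theorem nxt_getD (pref : List Int) (i : Nat) (hi : i < pref.length) :
    (buildNxt pref pref.length PySem.Dict.empty []).getD i none = nextEq pref i := by
  rw [buildNxt_eq pref pref.length PySem.Dict.empty [] le_rfl]
  · rw [List.append_nil, List.getD, List.getElem?_map, List.getElem?_range hi]
    rfl
  · intro v; simp [PySem.Dict.get?_empty]

theorem innerA_eq (lst : List Int) : ∀ fuel curr acc, lst.length - curr ≤ fuel →
    innerA lst fuel curr acc =
      (List.range' curr (lst.length - curr)).find?
        (fun c => decide (acc + (prefAt lst (c + 1) - prefAt lst curr) = 0)) := by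
  intro fuel
  induction fuel with
  | zero =>
    intro curr acc hf
    have h : lst.length - curr = 0 := by omega
    simp [innerA, h]
  | succ n ih =>
    intro curr acc hf
    rw [innerA]
    by_cases hc : curr < lst.length
    · simp only [hc, dif_pos]
      have hrange : lst.length - curr = (lst.length - (curr + 1)) + 1 := by omega
      rw [hrange, List.range'_succ, List.find?_cons]
      have hx : lst.getD curr 0 = lst[curr] := by simp [List.getD, List.getElem?_eq_getElem hc]
      have hps : prefAt lst (curr + 1) = prefAt lst curr + lst[curr] := by
        rw [prefAt_succ lst curr hc, hx]
      by_cases hz : acc + lst[curr] = 0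
      · have : decide (acc + (prefAt lst (curr + 1) - prefAt lst curr) = 0) = true := by
          rw [hps]; simp; omega
        simp [hz, this]
      · have hd : decide (acc + (prefAt lst (curr + 1) - prefAt lst curr) = 0) = false := by
          rw [hps]; simp; omega
        simp only [hz, if_false, hd]
        rw [ih (curr + 1) (acc + lst[curr]) (by omega)]
        apply find?_congr_mem
        intro c _
        rw [decide_eq_decide, hps]
        omega
    · have : lst.length - curr = 0 := by omega
      simp [hc, this]

-- the link: B's table entry at a head equals (inner-scan result) + 1
theorem nxt_link (lst : List Int) (start : Nat) (hs : start < lst.length) :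
    (buildNxt (prefB lst 0) (prefB lst 0).length PySem.Dict.empty []).getD start none =
      Option.map (· + 1) (innerA lst (lst.length - start) start 0) := by
  have hL : (prefB lst 0).length = lst.length + 1 := prefB_length lst 0
  rw [nxt_getD _ start (by omega)]
  unfold nextEq
  rw [hL]
  have hlen : lst.length + 1 - (start + 1) = lst.length - start := by omega
  rw [hlen, range'_succ_left, List.find?_map]
  rw [innerA_eq lst (lst.length - start) start 0 le_rfl]
  have hpred : ∀ c ∈ List.range' start (lst.length - start),
      ((fun j => (prefB lst 0).getD j 0 == (prefB lst 0).getD start 0) ∘ (· + 1)) c =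
      (fun c => decide (0 + (prefAt lst (c + 1) - prefAt lst start) = 0)) c := by
    intro c hc
    have hcb : start ≤ c ∧ c < start + (lst.length - start) := List.mem_range'_1.mp hc
    have h1 : c + 1 ≤ lst.length := by omega
    show ((prefB lst 0).getD (c + 1) 0 == (prefB lst 0).getD start 0) =
      decide (0 + (prefAt lst (c + 1) - prefAt lst start) = 0)
    rw [prefB_getD lst 0 (c + 1) h1, prefB_getD lst 0 start (by omega)]
    have hbd : ∀ a b : Int, (a == b) = decide (a = b) := fun a b => by
      by_cases h : a = b <;> simp [h]
    rw [hbd, decide_eq_decide]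
    omega
  rw [find?_congr_mem _ _ _ hpred]

theorem loop_equiv (lst : List Int) : ∀ fuel start res,
    outerA lst fuel start res =
      loopB lst (buildNxt (prefB lst 0) (prefB lst 0).length PySem.Dict.empty []) fuel start res := by
  intro fuel
  induction fuel with
  | zero => intro start res; rfl
  | succ n ih =>
    intro start res
    rw [outerA, loopB]
    by_cases hs : start < lst.length
    · simp only [hs, dif_pos]
      rw [nxt_link lst start hs]
      cases hm : innerA lst (lst.length - start) start 0 with
      | none => exact ih (start + 1) (res ++ [lst[start]])
      | some c => exact ih (c + 1) res
    · simp [hs]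

-- ===== VERDICT (by name: the statement is the Claim_ definition above) =====
theorem solve_spec : Claim_equal_solve := by
  intro lst _
  unfold Spec_solve solve solve_alt
  exact loop_equiv lst lst.length 0 []
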